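-- pv_equiv track=rewrite | github.com/ksilva91/PythonProyect | proyecto.py | decorateMap
-- ===== SOURCE A (Python) =====
-- import random, sys, copy, os, pygame
--
-- def isWall(mapObj, x, y):
--     """Returns True if the (x, y) position on
--     the map is a wall, otherwise return False."""
--     if x < 0 or x >= len(mapObj) or y < 0 or y >= len(mapObj[x]):
--         return False # x and y aren't actually on the map.
--     elif mapObj[x][y] in ('#','x','*'):
--         return True # wall is blocking
--     return False
--
-- def decorateMap(mapObj, startxy):
--     """Makes a copy of the given map object and modifies it.
--     Here is what is done to it:
--         * Walls that are corners are turned into corner pieces.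
--         * The outside/inside floor tile distinction is made.
--         * Tree/rock decorations are randomly added to the outside tiles.
--
--     Returns the decorated map object."""
--
--     startx, starty = startxy # Syntactic sugar
--
--     # Copy the map object so we don't modify the original passed
--     mapObjCopy = copy.deepcopy(mapObj)
--
--     # Remove the non-wall characters from the map data
--     for x in range(len(mapObjCopy)):
--         for y in range(len(mapObjCopy[0])):
--             if mapObjCopy[x][y] in ('$', '@'):
--                 mapObjCopy[x][y] = ' '
--
--     # Flood fill to determine inside/outside floor tiles.
--     floodFill(mapObjCopy, startx, starty, ' ', 'o')
--
--     # Convert the adjoined walls into corner tiles.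
--     for x in range(len(mapObjCopy)):
--         for y in range(len(mapObjCopy[0])):
--             if mapObjCopy[x][y] == '#':
--                 if (isWall(mapObjCopy, x, y-1) and isWall(mapObjCopy, x+1, y)) or \
--                    (isWall(mapObjCopy, x+1, y) and isWall(mapObjCopy, x, y+1)) or \
--                    (isWall(mapObjCopy, x, y+1) and isWall(mapObjCopy, x-1, y)) or \
--                    (isWall(mapObjCopy, x-1, y) and isWall(mapObjCopy, x, y-1)):
--                     mapObjCopy[x][y] = 'x'
--
--     return mapObjCopy
--
-- def floodFill(mapObj, x, y, oldCharacter, newCharacter):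
--     """Changes any values matching oldCharacter on the map object to
--     newCharacter at the (x, y) position, and does the same for the
--     positions to the left, right, down, and up of (x, y), recursively."""
--
--     # In this game, the flood fill algorithm creates the inside/outside
--     # floor distinction. This is a "recursive" function.
--     # For more info on the Flood Fill algorithm, see:
--     #   http://en.wikipedia.org/wiki/Flood_fill
--     if mapObj[x][y] == oldCharacter:
--         mapObj[x][y] = newCharacter
--
--     if x < len(mapObj) - 1 and mapObj[x+1][y] == oldCharacter:
--         floodFill(mapObj, x+1, y, oldCharacter, newCharacter) # call right
--     if x > 0 and mapObj[x-1][y] == oldCharacter: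
--         floodFill(mapObj, x-1, y, oldCharacter, newCharacter) # call left
--     if y < len(mapObj[x]) - 1 and mapObj[x][y+1] == oldCharacter:
--         floodFill(mapObj, x, y+1, oldCharacter, newCharacter) # call down
--     if y > 0 and mapObj[x][y-1] == oldCharacter:
--         floodFill(mapObj, x, y-1, oldCharacter, newCharacter) # call up
-- ===== SOURCE B (Python) =====
-- import copy
--
-- def _isWall(mapObj, x, y):
--     if x < 0 or x >= len(mapObj) or y < 0 or y >= len(mapObj[x]):
--         return False
--     return mapObj[x][y] in ('#', 'x', '*')
--
-- def _neighbors(mapObj, x, y):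
--     # pending positions, in the order they will be pushed; the LAST one is
--     # popped first, so the pop order is: right, left, down, up (as in the
--     # recursive version).  Only the bounds are checked here; whether the
--     # cell still holds oldCharacter is checked when it is popped.
--     nbrs = []
--     if y > 0:
--         nbrs.append((x, y - 1))
--     if y < len(mapObj[x]) - 1:
--         nbrs.append((x, y + 1))
--     if x > 0:
--         nbrs.append((x - 1, y))
--     if x < len(mapObj) - 1:
--         nbrs.append((x + 1, y))
--     return nbrs
--
-- def _floodFillIter(mapObj, x, y, oldCharacter, newCharacter):
--     # Iterative depth-first flood fill with an explicit stack.
--     if mapObj[x][y] == oldCharacter: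
--         mapObj[x][y] = newCharacter
--     stack = _neighbors(mapObj, x, y)
--     while stack:
--         x, y = stack.pop()
--         if mapObj[x][y] == oldCharacter:
--             mapObj[x][y] = newCharacter
--             stack.extend(_neighbors(mapObj, x, y))
--
-- def decorateMap(mapObj, startxy):
--     startx, starty = startxy
--     # clearing pass as a comprehension instead of nested index loops
--     mapObjCopy = [[' ' if c in ('$', '@') else c for c in row] for row in mapObj]
--     _floodFillIter(mapObjCopy, startx, starty, ' ', 'o')
--     for x in range(len(mapObjCopy)):
--         for y in range(len(mapObjCopy[0])):
--             if mapObjCopy[x][y] == '#':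
--                 if (_isWall(mapObjCopy, x, y-1) and _isWall(mapObjCopy, x+1, y)) or \
--                    (_isWall(mapObjCopy, x+1, y) and _isWall(mapObjCopy, x, y+1)) or \
--                    (_isWall(mapObjCopy, x, y+1) and _isWall(mapObjCopy, x-1, y)) or \
--                    (_isWall(mapObjCopy, x-1, y) and _isWall(mapObjCopy, x, y-1)):
--                     mapObjCopy[x][y] = 'x'
--     return mapObjCopy
-- ===== Notes on version B (the rewrite author's own statement) =====
-- stated objective: alternative
-- what changed: The recursive flood fill is replaced by an iterative depth-first fill with an explicit stack (bounds checked at push, cell value re-checked at pop), and the index-loop clearing pass by a per-row list comprehension; the corner pass is unchanged.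
-- outside the precondition, e.g. on decorateMap([['#', ' ']], (0, 5)): A raises IndexError, B raises IndexError; on decorateMap([['#', ' '], [' ']], (0, 1)): A raises IndexError, B raises IndexError
import Mathlib
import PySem

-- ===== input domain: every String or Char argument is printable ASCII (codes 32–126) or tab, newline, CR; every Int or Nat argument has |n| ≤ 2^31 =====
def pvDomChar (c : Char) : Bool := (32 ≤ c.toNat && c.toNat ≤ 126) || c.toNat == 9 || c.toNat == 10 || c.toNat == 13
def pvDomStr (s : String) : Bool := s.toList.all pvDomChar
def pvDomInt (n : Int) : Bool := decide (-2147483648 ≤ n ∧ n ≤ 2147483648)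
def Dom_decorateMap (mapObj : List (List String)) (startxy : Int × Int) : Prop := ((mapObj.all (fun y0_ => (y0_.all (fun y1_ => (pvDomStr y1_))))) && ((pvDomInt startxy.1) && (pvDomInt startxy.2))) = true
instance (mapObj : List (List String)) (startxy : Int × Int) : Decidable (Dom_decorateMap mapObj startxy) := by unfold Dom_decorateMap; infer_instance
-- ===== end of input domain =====

-- B replaces the recursive flood fill by an explicit-stack iterative one and the index-loop
-- clearing pass by a per-row map; same return value (the Python functions mutate a deep copy,
-- so neither A nor B mutates the caller's argument).

-- ===== PORT A =====
-- Helper facts the ports' well-founded termination arguments cite by name (they must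
-- therefore precede the ports).
theorem pyIdx?_lt {n : Nat} {i : Int} {j : Nat} (h : PySem.List.pyIdx? n i = some j) : j < n := by
  unfold PySem.List.pyIdx? at h; split_ifs at h <;> simp_all <;> omega

theorem count_set_lt {xs : List String} {k : Nat} {v old : String}
    (hk : k < xs.length) (hx : xs[k] = old) (hv : v ≠ old) :
    (xs.set k v).count old < xs.count old := by
  conv_rhs => rw [← List.set_getElem_self (as := xs) (i := k) hk]
  rw [List.set_eq_take_append_cons_drop, List.set_eq_take_append_cons_drop]
  simp [hk, List.count_append, hx, hv]

theorem sum_set_lt {l : List Nat} {j a : Nat} (hj : j < l.length) (ha : a < l[j]) :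
    (l.set j a).sum < l.sum := by
  rw [List.sum_set]
  conv_rhs => rw [← List.set_getElem_self (as := l) (i := j) hj, List.sum_set]
  simp only [hj, if_pos]
  omega

-- Shared grid primitives (Python's mapObj[x][y] read / write, with Python's
-- negative-index wraparound; the `none` of a read is exactly Python's IndexError).
def gget (g : List (List String)) (x y : Int) : Option String :=
  match PySem.List.pyIdx? g.length x with
  | some j => PySem.List.pyGet? (g.getD j []) y
  | none => none

def gset (g : List (List String)) (x y : Int) (v : String) : List (List String) :=
  match PySem.List.pyIdx? g.length x with
  | some j => g.set j (PySem.List.pySetD (g.getD j []) y v)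
  | none => g

-- len(mapObj[x]) (value irrelevant when x is an invalid index: Python raises there)
def rowLenI (g : List (List String)) (x : Int) : Int :=
  (((PySem.List.pyGet? g x).getD []).length : Int)

-- number of cells equal to `old` (termination measure of the recursive flood fill)
def countOld (old : String) (g : List (List String)) : Nat :=
  (g.map (fun r => r.count old)).sum

-- isWall, transliterated (used verbatim by both Pythons)
def isWall (g : List (List String)) (x y : Int) : Bool :=
  if x < 0 || (g.length : Int) ≤ x || y < 0 || rowLenI g x ≤ y then false
  else (gget g x y == some "#") || (gget g x y == some "x") || (gget g x y == some "*")

theorem gset_of_idx {g : List (List String)} {x y : Int} {j k : Nat} (v : String)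
    (hj : PySem.List.pyIdx? g.length x = some j)
    (hk : PySem.List.pyIdx? (g.getD j []).length y = some k) :
    gset g x y v = g.set j ((g.getD j []).set k v) := by
  unfold gset PySem.List.pySetD PySem.List.pySet?
  rw [hj]; dsimp only; rw [hk]; rfl

theorem gget_some_elim {g : List (List String)} {x y : Int} {s : String} (h : gget g x y = some s) :
    ∃ j k : Nat, PySem.List.pyIdx? g.length x = some j ∧ j < g.length ∧
      PySem.List.pyIdx? (g.getD j []).length y = some k ∧ k < (g.getD j []).length ∧
      (g.getD j [])[k]? = some s := by
  unfold gget PySem.List.pyGet? at h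
  rcases hj : PySem.List.pyIdx? g.length x with _ | j
  · rw [hj] at h; exact absurd h (by simp)
  · rw [hj] at h; try dsimp only at h
    rcases hk : PySem.List.pyIdx? (g.getD j []).length y with _ | k
    · rw [hk] at h; exact absurd h (by simp)
    · rw [hk] at h; try dsimp only at h
      exact ⟨j, k, by simpa using hj, pyIdx?_lt hj, by simpa using hk, pyIdx?_lt hk, h⟩

theorem countOld_gset_lt {g : List (List String)} {x y : Int} {old : String} {v : String}
    (h : gget g x y = some old) (hv : v ≠ old) :
    countOld old (gset g x y v) < countOld old g := by
  obtain ⟨j, k, hj, hjl, hk, hkl, hval⟩ := gget_some_elim h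
  rw [gset_of_idx v hj hk]
  unfold countOld
  rw [List.map_set]
  apply sum_set_lt (by simpa using hjl)
  have hrow : g.getD j [] = g[j] := List.getD_eq_getElem g [] hjl
  obtain ⟨_, hval'⟩ := List.getElem?_eq_some_iff.1 hval
  simp only [List.getElem_map]
  rw [← hrow]
  exact count_set_lt hkl hval' hv

-- A's floodFill.  The Python recursion terminates because every recursive call is guarded by
-- "the target cell still holds oldCharacter" and the callee immediately overwrites that cell,
-- so the recursion depth never exceeds the number of `old` cells + 1.  The port makes that
-- bound explicit as structural fuel (floodFillA below passes more than enough of it); the body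
-- is A's, line for line: the maybe-set of the start cell, then the four guarded recursive
-- calls in A's order (right, left, down, up).  When oldCharacter == newCharacter the Python
-- either returns the map unchanged or recurses forever; the port returns it unchanged
-- (decorateMap only ever passes ' ' and 'o').
def ffKids (old : String) (ff : List (List String) → Int → Int → List (List String))
    (g : List (List String)) (x y : Int) : List (List String) :=
  -- if x < len(mapObj)-1 and mapObj[x+1][y] == old: floodFill right
  let g2 := if x < (g.length : Int) - 1 ∧ gget g (x + 1) y = some old then ff g (x + 1) y else g
  -- if x > 0 and mapObj[x-1][y] == old: floodFill left
  let g3 := if 0 < x ∧ gget g2 (x - 1) y = some old then ff g2 (x - 1) y else g2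
  -- if y < len(mapObj[x])-1 and mapObj[x][y+1] == old: floodFill down
  let g4 := if y < rowLenI g3 x - 1 ∧ gget g3 x (y + 1) = some old then ff g3 x (y + 1) else g3
  -- if y > 0 and mapObj[x][y-1] == old: floodFill up
  if 0 < y ∧ gget g4 x (y - 1) = some old then ff g4 x (y - 1) else g4

def ffA (old new : String) : Nat → List (List String) → Int → Int → List (List String)
  | 0, g, _, _ => g
  | fuel + 1, g, x, y =>
    if old = new then g
    else
      -- if mapObj[x][y] == oldCharacter: mapObj[x][y] = newCharacter
      ffKids old (ffA old new fuel)
        (if gget g x y = some old then gset g x y new else g) x y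

def floodFillA (old new : String) (g : List (List String)) (x y : Int) : List (List String) :=
  ffA old new (countOld old g + 2) g x y

-- the clearing pass of A: nested index loops replacing '$'/'@' by ' '
def clearA (g : List (List String)) : List (List String) :=
  (PySem.List.pyRange 0 g.length 1).foldl (fun acc x =>
    (PySem.List.pyRange 0 ((acc.headD []).length) 1).foldl (fun a2 y =>
      if (gget a2 x y == some "$") || (gget a2 x y == some "@") then gset a2 x y " " else a2) acc) g

-- the corner pass (identical source text in A and in B; ported once, used by both)
def cornerOk (g : List (List String)) (x y : Int) : Bool :=
  (isWall g x (y - 1) && isWall g (x + 1) y) ||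
  (isWall g (x + 1) y && isWall g x (y + 1)) ||
  (isWall g x (y + 1) && isWall g (x - 1) y) ||
  (isWall g (x - 1) y && isWall g x (y - 1))

def cornerPass (g : List (List String)) : List (List String) :=
  (PySem.List.pyRange 0 g.length 1).foldl (fun acc x =>
    (PySem.List.pyRange 0 ((acc.headD []).length) 1).foldl (fun a2 y =>
      if (gget a2 x y == some "#") && cornerOk a2 x y then gset a2 x y "x" else a2) acc) g

def decorateMap (mapObj : List (List String)) (startxy : Int × Int) : List (List String) :=
  cornerPass (floodFillA " " "o" (clearA mapObj) startxy.1 startxy.2)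

-- ===== PORT B =====
-- clearing pass as a comprehension (B: [[' ' if c in ('$','@') else c for c in row] for row in mapObj])
def clearB (g : List (List String)) : List (List String) :=
  g.map (fun row => row.map (fun c => if c == "$" || c == "@" then " " else c))

-- _neighbors, head = top of stack (Python's stack keeps its top LAST; this list is reversed(nbrs))
def nbrsRev (g : List (List String)) (x y : Int) : List (Int × Int) :=
  (if x < (g.length : Int) - 1 then [(x + 1, y)] else []) ++
  (if 0 < x then [(x - 1, y)] else []) ++
  (if y < rowLenI g x - 1 then [(x, y + 1)] else []) ++
  (if 0 < y then [(x, y - 1)] else [])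

-- B's while-loop over the explicit stack (same old==new disclaimer as for ffA)
def ffLoop (old new : String) (g : List (List String)) (stack : List (Int × Int)) :
    List (List String) :=
  if hne : old = new then g
  else match stack with
    | [] => g
    | (x, y) :: rest =>
      if hc : gget g x y = some old then
        ffLoop old new (gset g x y new) (nbrsRev (gset g x y new) x y ++ rest)
      else ffLoop old new g rest
termination_by (countOld old g, stack.length)
decreasing_by
  · exact Prod.Lex.left _ _ (countOld_gset_lt hc (fun h => hne h.symm))
  · exact Prod.Lex.right _ (by simp)

def ffB (old new : String) (g : List (List String)) (x y : Int) : List (List String) :=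
  if old = new then g
  else
    let g1 := if gget g x y = some old then gset g x y new else g
    ffLoop old new g1 (nbrsRev g1 x y)

def decorateMap_alt (mapObj : List (List String)) (startxy : Int × Int) : List (List String) :=
  cornerPass (ffB " " "o" (clearB mapObj) startxy.1 startxy.2)

-- ===== PRECONDITION & SPEC =====
-- Pre_ restricts to rectangular, nonempty maps with the start inside Python's index range —
-- the natural domain of a sokoban map; wrap-around starts with -len <= index < 0 are INSIDE
-- Pre_.  Outside it A raises IndexError (empty map or first row, out-of-range start, a fill
-- or a pass stepping past the end of a shorter row) or, on rows longer than row 0, A's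
-- clearing loop stops at len(row 0) columns where B clears whole rows.
def Pre_decorateMap (mapObj : List (List String)) (startxy : Int × Int) : Prop :=
  mapObj ≠ [] ∧
  (∀ row ∈ mapObj, row.length = (mapObj.headD []).length) ∧
  0 < (mapObj.headD []).length ∧
  -(mapObj.length : Int) ≤ startxy.1 ∧ startxy.1 < (mapObj.length : Int) ∧
  -((mapObj.headD []).length : Int) ≤ startxy.2 ∧ startxy.2 < ((mapObj.headD []).length : Int)

instance (mapObj : List (List String)) (startxy : Int × Int) : Decidable (Pre_decorateMap mapObj startxy) := by
  unfold Pre_decorateMap; infer_instance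

def pvWitness_decorateMap : List (List String) × (Int × Int) :=
  ([["#", "#", "#"], ["#", " ", "#"], ["#", "#", "#"]], (1, 1))

def Spec_decorateMap (mapObj : List (List String)) (startxy : Int × Int) (out : List (List String)) : Prop := out = decorateMap_alt mapObj startxy
instance (mapObj : List (List String)) (startxy : Int × Int) (out : List (List String)) : Decidable (Spec_decorateMap mapObj startxy out) := by unfold Spec_decorateMap; infer_instance

-- ===== CLAIM (what is proved, stated in full; the proofs are below) =====
def Claim_equal_decorateMap : Prop := ∀ (mapObj : List (List String)) (startxy : Int × Int), Dom_decorateMap mapObj startxy → Pre_decorateMap mapObj startxy → Spec_decorateMap mapObj startxy (decorateMap mapObj startxy)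

-- ===== LEMMAS AND PROOFS =====

def gshape (g : List (List String)) : List Nat := g.map List.length


-- Indexing with a Nat cast
theorem pyIdx?_natCast {n i : Nat} (h : i < n) : PySem.List.pyIdx? n (i : Int) = some i := by
  unfold PySem.List.pyIdx?; simp; omega

theorem gget_natCast {g : List (List String)} {j k : Nat} (hj : j < g.length) :
    gget g (j : Int) (k : Int) = (g[j])[k]? := by
  unfold gget
  rw [pyIdx?_natCast hj]
  simp [PySem.List.pyGet?_natCast, List.getElem?_eq_getElem hj]

theorem gset_natCast {g : List (List String)} {j : Nat} (k : Nat) (v : String) (hj : j < g.length) :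
    gset g (j : Int) (k : Int) v = g.set j ((g[j]).set k v) := by
  unfold gset
  rw [pyIdx?_natCast hj]
  simp [List.getD_eq_getElem g [] hj, List.getElem?_eq_getElem hj]

-- shape-congruence facts
theorem glen_congr {g' g : List (List String)} (hs : gshape g' = gshape g) :
    g'.length = g.length := by
  have := congrArg List.length hs
  simpa [gshape] using this

theorem rowLenI_congr {g' g : List (List String)} (hs : gshape g' = gshape g) (x : Int) :
    rowLenI g' x = rowLenI g x := by
  unfold rowLenI PySem.List.pyGet?
  rw [glen_congr hs]
  rcases hj : PySem.List.pyIdx? g.length x with _ | j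
  · rfl
  · have hjl := pyIdx?_lt hj
    have h1 : (g'[j]?.getD []).length = (g[j]?.getD []).length := by
      have hl' : j < g'.length := by rw [glen_congr hs]; exact hjl
      rw [List.getElem?_eq_getElem hjl, List.getElem?_eq_getElem hl']
      have := congrArg (fun l => l[j]?) hs
      simpa [gshape, List.getElem?_eq_getElem, hjl, hl'] using this
    simp [h1]

theorem gshape_gset (g : List (List String)) (x y : Int) (v : String) :
    gshape (gset g x y v) = gshape g := by
  unfold gset gshape
  rcases hj : PySem.List.pyIdx? g.length x with _ | j
  · rfl
  · have hjl := pyIdx?_lt hj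
    rw [List.map_set, PySem.List.length_pySetD, List.getD_eq_getElem g [] hjl]
    have hjl' : j < (g.map List.length).length := by simpa using hjl
    have h2 : (List.map List.length g)[j] = g[j].length := by simp
    rw [← h2, List.set_getElem_self]

-- monotonicity of the fuelled fill: old cells never grow back, the shape never changes
theorem countOld_gset_le {g : List (List String)} {x y : Int} {old new : String}
    (hne : old ≠ new) :
    countOld old (if gget g x y = some old then gset g x y new else g) ≤ countOld old g := by
  split
  · next hc => exact le_of_lt (countOld_gset_lt hc (fun h => hne h.symm))
  · exact le_refl _

theorem countOld_ffKids_le {old : String}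
    {ff : List (List String) → Int → Int → List (List String)}
    (hf : ∀ g x y, countOld old (ff g x y) ≤ countOld old g)
    (g : List (List String)) (x y : Int) :
    countOld old (ffKids old ff g x y) ≤ countOld old g := by
  simp only [ffKids]
  set G2 := if x < (g.length : Int) - 1 ∧ gget g (x + 1) y = some old then ff g (x + 1) y else g
    with hG2
  have h2 : countOld old G2 ≤ countOld old g := by
    rw [hG2]; split; exacts [hf _ _ _, le_refl _]
  set G3 := if 0 < x ∧ gget G2 (x - 1) y = some old then ff G2 (x - 1) y else G2 with hG3
  have h3 : countOld old G3 ≤ countOld old g := by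
    rw [hG3]; split; exacts [le_trans (hf _ _ _) h2, h2]
  set G4 := if y < rowLenI G3 x - 1 ∧ gget G3 x (y + 1) = some old then ff G3 x (y + 1) else G3
    with hG4
  have h4 : countOld old G4 ≤ countOld old g := by
    rw [hG4]; split; exacts [le_trans (hf _ _ _) h3, h3]
  split
  exacts [le_trans (hf _ _ _) h4, h4]

theorem gshape_ffKids {old : String}
    {ff : List (List String) → Int → Int → List (List String)}
    (hf : ∀ g x y, gshape (ff g x y) = gshape g)
    (g : List (List String)) (x y : Int) :
    gshape (ffKids old ff g x y) = gshape g := by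
  simp only [ffKids]
  set G2 := if x < (g.length : Int) - 1 ∧ gget g (x + 1) y = some old then ff g (x + 1) y else g
    with hG2
  have h2 : gshape G2 = gshape g := by
    rw [hG2]; split; exacts [hf _ _ _, rfl]
  set G3 := if 0 < x ∧ gget G2 (x - 1) y = some old then ff G2 (x - 1) y else G2 with hG3
  have h3 : gshape G3 = gshape g := by
    rw [hG3]; split; exacts [(hf _ _ _).trans h2, h2]
  set G4 := if y < rowLenI G3 x - 1 ∧ gget G3 x (y + 1) = some old then ff G3 x (y + 1) else G3
    with hG4
  have h4 : gshape G4 = gshape g := by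
    rw [hG4]; split; exacts [(hf _ _ _).trans h3, h3]
  split
  exacts [(hf _ _ _).trans h4, h4]

theorem countOld_ffA_le (old new : String) :
    ∀ (fuel : Nat) (g : List (List String)) (x y : Int),
      countOld old (ffA old new fuel g x y) ≤ countOld old g := by
  intro fuel
  induction fuel with
  | zero => intro g x y; exact le_refl _
  | succ n IH =>
    intro g x y
    rw [ffA]
    split
    · exact le_refl _
    · next hne =>
      exact le_trans (countOld_ffKids_le (fun g' x' y' => IH g' x' y') _ x y)
        (countOld_gset_le hne)

theorem gshape_ffA (old new : String) :
    ∀ (fuel : Nat) (g : List (List String)) (x y : Int),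
      gshape (ffA old new fuel g x y) = gshape g := by
  intro fuel
  induction fuel with
  | zero => intro g x y; rfl
  | succ n IH =>
    intro g x y
    rw [ffA]
    split
    · rfl
    · refine (gshape_ffKids (fun g' x' y' => IH g' x' y') _ x y).trans ?_
      split
      · exact gshape_gset _ _ _ _
      · rfl

theorem ffLoop_nil (old new : String) (g : List (List String)) :
    ffLoop old new g [] = g := by
  rw [ffLoop]; split <;> rfl

theorem ffLoop_cons_old {old new : String} {g : List (List String)} {x y : Int}
    (rest : List (Int × Int)) (hne : old ≠ new) (hc : gget g x y = some old) :
    ffLoop old new g ((x, y) :: rest) =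
      ffLoop old new (gset g x y new) (nbrsRev (gset g x y new) x y ++ rest) := by
  rw [ffLoop]; simp [hne, hc]

theorem ffLoop_cons_not {old new : String} {g : List (List String)} {x y : Int}
    (rest : List (Int × Int)) (hne : old ≠ new) (hc : ¬ gget g x y = some old) :
    ffLoop old new g ((x, y) :: rest) = ffLoop old new g rest := by
  rw [ffLoop]; simp [hne, hc]

-- one stack step of B against one guarded conditional of A
theorem sim_step {old new : String} {g : List (List String)} {d : Int × Int}
    {f : List (List String) → Int → Int → List (List String)}
    (cond : Prop) [Decidable cond] (rest : List (Int × Int)) (hne : old ≠ new)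
    (H1 : gget g d.1 d.2 = some old →
      ffLoop old new g (d :: rest) = ffLoop old new (f g d.1 d.2) rest) :
    ffLoop old new g ((if cond then [d] else []) ++ rest) =
      ffLoop old new
        (if cond ∧ gget g d.1 d.2 = some old then f g d.1 d.2 else g) rest := by
  by_cases hcond : cond
  · rw [if_pos hcond, List.singleton_append]
    by_cases hc : gget g d.1 d.2 = some old
    · rw [if_pos ⟨hcond, hc⟩]; exact H1 hc
    · rw [if_neg (fun h => hc h.2)]
      obtain ⟨dx, dy⟩ := d
      exact ffLoop_cons_not rest hne hc
  · rw [if_neg hcond, List.nil_append, if_neg (fun h => hcond h.1)]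

-- B's stack loop, run on the four pending neighbours of (x, y), computes exactly the four
-- guarded recursive calls of A's body (ffKids) — provided the one-cell simulation
-- (hypothesis H) holds for every grid with at most as many old cells.
theorem sim_children {old new : String} (hne : old ≠ new)
    (f : List (List String) → Int → Int → List (List String))
    (hfc : ∀ g x y, countOld old (f g x y) ≤ countOld old g)
    (hfs : ∀ g x y, gshape (f g x y) = gshape g)
    (g : List (List String)) (x y : Int) (rest : List (Int × Int))
    (H : ∀ g' (x' y' : Int) (rest' : List (Int × Int)),
      countOld old g' ≤ countOld old g → gget g' x' y' = some old →
      ffLoop old new g' ((x', y') :: rest') = ffLoop old new (f g' x' y') rest') :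
    ffLoop old new g (nbrsRev g x y ++ rest) = ffLoop old new (ffKids old f g x y) rest := by
  unfold nbrsRev
  rw [List.append_assoc, List.append_assoc, List.append_assoc]
  rw [sim_step (d := (x + 1, y)) _ _ hne (fun hc => H g (x + 1) y _ (le_refl _) hc)]
  set G2 := if x < (g.length : Int) - 1 ∧ gget g (x + 1) y = some old
    then f g (x + 1) y else g with hG2
  have hc2 : countOld old G2 ≤ countOld old g := by
    rw [hG2]; split
    · exact hfc _ _ _
    · exact le_refl _
  have hs2 : gshape G2 = gshape g := by
    rw [hG2]; split
    · exact hfs _ _ _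
    · rfl
  rw [sim_step (d := (x - 1, y)) _ _ hne (fun hc => H G2 (x - 1) y _ hc2 hc)]
  set G3 := if 0 < x ∧ gget G2 (x - 1) y = some old then f G2 (x - 1) y else G2 with hG3
  have hc3 : countOld old G3 ≤ countOld old g := by
    rw [hG3]; split
    · exact le_trans (hfc _ _ _) hc2
    · exact hc2
  have hs3 : gshape G3 = gshape g := by
    rw [hG3]; split
    · exact (hfs _ _ _).trans hs2
    · exact hs2
  rw [sim_step (d := (x, y + 1)) _ _ hne (fun hc => H G3 x (y + 1) _ hc3 hc)]
  rw [show (if y < rowLenI g x - 1 ∧ gget G3 x (y + 1) = some old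
        then f G3 x (y + 1) else G3) =
      (if y < rowLenI G3 x - 1 ∧ gget G3 x (y + 1) = some old
        then f G3 x (y + 1) else G3) by rw [rowLenI_congr hs3]]
  set G4 := if y < rowLenI G3 x - 1 ∧ gget G3 x (y + 1) = some old
    then f G3 x (y + 1) else G3 with hG4
  have hc4 : countOld old G4 ≤ countOld old g := by
    rw [hG4]; split
    · exact le_trans (hfc _ _ _) hc3
    · exact hc3
  rw [sim_step (d := (x, y - 1)) _ _ hne (fun hc => H G4 x (y - 1) _ hc4 hc)]
  rfl

-- the one-cell simulation itself, by induction on the fuel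
theorem sim {old new : String} (hne : old ≠ new) :
    ∀ (fuel : Nat) (g : List (List String)) (x y : Int) (rest : List (Int × Int)),
      countOld old g < fuel → gget g x y = some old →
      ffLoop old new g ((x, y) :: rest) = ffLoop old new (ffA old new fuel g x y) rest := by
  intro fuel
  induction fuel with
  | zero => intro g x y rest hcnt; exact absurd hcnt (Nat.not_lt_zero _)
  | succ n IH =>
    intro g x y rest hcnt hc
    have hlt : countOld old (gset g x y new) < countOld old g :=
      countOld_gset_lt hc (fun h => hne h.symm)
    rw [ffLoop_cons_old rest hne hc,
      show ffA old new (n + 1) g x y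
        = ffKids old (ffA old new n) (gset g x y new) x y by rw [ffA]; simp [hne, hc]]
    exact sim_children hne (ffA old new n) (countOld_ffA_le old new n) (gshape_ffA old new n)
      _ x y rest (fun g' x' y' rest' hle hc' => IH g' x' y' rest' (by omega) hc')

-- the two flood fills agree
theorem ffB_eq_ffA (old new : String) (g : List (List String)) (x y : Int) :
    ffB old new g x y = floodFillA old new g x y := by
  by_cases hne : old = new
  · rw [ffB, floodFillA, ffA]; simp [hne]
  · rw [ffB, floodFillA]
    simp only [hne, if_neg, not_false_iff]
    rw [show ffA old new (countOld old g + 2) g x y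
      = ffKids old (ffA old new (countOld old g + 1))
          (if gget g x y = some old then gset g x y new else g) x y by rw [ffA]; simp [hne]]
    set g1 := if gget g x y = some old then gset g x y new else g with hg1
    have hb : countOld old g1 ≤ countOld old g := countOld_gset_le hne
    rw [← List.append_nil (nbrsRev g1 x y)]
    exact sim_children hne (ffA old new (countOld old g + 1))
      (countOld_ffA_le old new _) (gshape_ffA old new _) g1 x y []
      (fun g' x' y' rest' hle hc' =>
        (sim hne (countOld old g + 1) g' x' y' rest' (by omega) hc')) |>.trans
      (ffLoop_nil old new _)

-- ===== clearing pass: A's nested index loops = B's per-row map =====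
def rowf : String → String := fun c => if c == "$" || c == "@" then " " else c

theorem clear_inner (g : List (List String)) (j : Nat) (hj : j < g.length) :
    ∀ (k : Nat), k ≤ (g[j]).length →
      (PySem.List.pyRange 0 (k : Int) 1).foldl
        (fun a2 y => if (gget a2 (j : Int) y == some "$") || (gget a2 (j : Int) y == some "@")
          then gset a2 (j : Int) y " " else a2) g
      = g.set j (((g[j]).take k).map rowf ++ (g[j]).drop k) := by
  intro k
  induction k with
  | zero =>
    intro _
    simp [PySem.List.pyRange, List.set_getElem_self hj]
  | succ k IHk =>
    intro hk1
    have hk : k < (g[j]).length := by omega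
    have hcast : ((k + 1 : Nat) : Int) = (k : Int) + 1 := by push_cast; ring
    rw [hcast, PySem.List.pyRange_one_succ_right (by positivity), List.foldl_append,
      IHk (by omega)]
    set A := ((g[j]).take k).map rowf with hA
    have hlenA : A.length = k := by simp [hA]; omega
    have hD : (g[j]).drop k = (g[j])[k] :: (g[j]).drop (k + 1) := List.drop_eq_getElem_cons hk
    have hjG : j < (g.set j (A ++ (g[j]).drop k)).length := by simpa using hj
    have hGj : (g.set j (A ++ (g[j]).drop k))[j] = A ++ (g[j]).drop k :=
      List.getElem_set_self hjG
    have hget : gget (g.set j (A ++ (g[j]).drop k)) (j : Int) (k : Int) = some ((g[j])[k]) := by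
      rw [gget_natCast (by simpa using hj), hGj, List.getElem?_append_right (by omega), hD]
      simp [hlenA]
    have htake : ((g[j]).take (k + 1)).map rowf = A ++ [rowf ((g[j])[k])] := by
      rw [List.take_add_one, List.getElem?_eq_getElem hk]
      simp only [Option.toList_some, List.map_append, List.map_cons, List.map_nil, hA]
    simp only [List.foldl_cons, List.foldl_nil, hget]
    by_cases hcond : ((g[j])[k] == "$") || ((g[j])[k] == "@")
    · rw [if_pos (by simpa using hcond),
        gset_natCast k " " (by simpa using hj), List.set_set, hGj, hD]
      rw [List.set_append]
      rw [if_neg (by omega), hlenA]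
      simp only [Nat.sub_self, List.set_cons_zero, htake]
      have : rowf ((g[j])[k]) = " " := by
        unfold rowf; rw [if_pos hcond]
      rw [this]
      simp
    · rw [if_neg (by simpa using hcond), hD, htake]
      have : rowf ((g[j])[k]) = (g[j])[k] := by
        unfold rowf; rw [if_neg hcond]
      rw [this]
      simp

theorem clear_outer (g : List (List String))
    (hrect : ∀ row ∈ g, row.length = (g.headD []).length) :
    ∀ (m : Nat), m ≤ g.length →
      (PySem.List.pyRange 0 (m : Int) 1).foldl (fun acc x =>
        (PySem.List.pyRange 0 ((acc.headD []).length) 1).foldl (fun a2 y =>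
          if (gget a2 x y == some "$") || (gget a2 x y == some "@")
            then gset a2 x y " " else a2) acc) g
      = (g.take m).map (List.map rowf) ++ g.drop m := by
  intro m
  induction m with
  | zero => intro _; simp [PySem.List.pyRange]
  | succ m IHm =>
    intro hm1
    have hm : m < g.length := by omega
    have hcast : ((m + 1 : Nat) : Int) = (m : Int) + 1 := by push_cast; ring
    rw [hcast, PySem.List.pyRange_one_succ_right (by positivity), List.foldl_append,
      IHm (by omega)]
    set acc := (g.take m).map (List.map rowf) ++ g.drop m with hacc
    have hlenA : ((g.take m).map (List.map rowf)).length = m := by simp; omega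
    have hlacc : acc.length = g.length := by simp [hacc]; omega
    have hmacc : m < acc.length := by omega
    have hD : g.drop m = g[m] :: g.drop (m + 1) := List.drop_eq_getElem_cons hm
    have haccm? : acc[m]? = some (g[m]) := by
      rw [hacc, List.getElem?_append_right (by omega), hlenA, Nat.sub_self, hD]
      rfl
    have haccm : acc[m] = g[m] := by
      have h := List.getElem?_eq_getElem hmacc
      rw [haccm?] at h
      exact (Option.some.inj h).symm
    have hhead : (acc.headD []).length = (g.headD []).length := by
      rcases m with _ | mm
      · simp [hacc]
      · cases g with
        | nil => simp at hm
        | cons a t =>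
          have : acc.headD [] = List.map rowf a := by
            simp [hacc, List.take_succ_cons]
          rw [this]
          simp
    have hrowm : (acc[m]).length = (acc.headD []).length := by
      rw [haccm, hhead]
      exact hrect g[m] (List.getElem_mem hm)
    simp only [List.foldl_cons, List.foldl_nil]
    rw [clear_inner acc m hmacc ((acc.headD []).length) (by omega)]
    rw [show ((acc[m]).take ((acc.headD []).length)).map rowf ++
          (acc[m]).drop ((acc.headD []).length)
        = List.map rowf (g[m]) by rw [← hrowm, List.take_length, List.drop_length, haccm]; simp]
    rw [hacc, List.set_append, if_neg (by omega), hlenA, Nat.sub_self, hD, List.set_cons_zero]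
    have htk1 : g.take (m + 1) = g.take m ++ [g[m]] := by
      rw [List.take_add_one, List.getElem?_eq_getElem hm]; rfl
    rw [htk1, List.map_append]
    simp

theorem clearA_eq_clearB (g : List (List String))
    (hrect : ∀ row ∈ g, row.length = (g.headD []).length) :
    clearA g = clearB g := by
  unfold clearA clearB
  rw [clear_outer g hrect g.length (le_refl _)]
  simp [rowf]

-- ===== VERDICT (by name: the statement is the Claim_ definition above) =====
theorem decorateMap_spec : Claim_equal_decorateMap := by
  intro mapObj startxy _hdom hpre
  unfold Spec_decorateMap decorateMap decorateMap_alt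
  rw [ffB_eq_ffA, clearA_eq_clearB mapObj hpre.2.1]
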